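-- pv_equiv track=rewrite | github.com/psmeireles/advent-of-code | 2021/Day 18/Part 1/solution.py | getReduceAction
-- ===== SOURCE A (Python) =====
-- def getReduceAction(flattenedList):
--     for i in range(len(flattenedList)):
--         if flattenedList[i][1] > 4 and flattenedList[i+1][1] == flattenedList[i][1]:
--             return "explode", i
--     for i in range(len(flattenedList)):
--         if flattenedList[i][0] > 9:
--             return "split", i
--     return None, None
-- ===== SOURCE B (Python) =====
-- def getReduceAction(flattenedList):
--     # Single pass: check explode (adjacent equal depths > 4) with priority,
--     # while remembering the first index whose value exceeds 9 for a split.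
--     n = len(flattenedList)
--     first_split = None
--     for i in range(n):
--         if i + 1 < n and flattenedList[i][1] > 4 and flattenedList[i + 1][1] == flattenedList[i][1]:
--             return "explode", i
--         if first_split is None and flattenedList[i][0] > 9:
--             first_split = i
--     if first_split is not None:
--         return "split", first_split
--     return None, None
-- ===== Notes on version B (the rewrite author's own statement) =====
-- stated objective: alternative
-- what changed: Replaced A's two sequential scans by a single bounds-checked pass that returns on the first explode pair and otherwise accumulates the first split index.
-- crash fix: On non-empty lists whose last element has depth > 4 and which contain no adjacent explode pair, A raises IndexError at flattenedList[i+1]; B returns the normal answer (the first split index, or (None, None)). — e.g. on getReduceAction([(0, 5)]): A raises IndexError, B returns (none, none)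
import Mathlib
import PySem

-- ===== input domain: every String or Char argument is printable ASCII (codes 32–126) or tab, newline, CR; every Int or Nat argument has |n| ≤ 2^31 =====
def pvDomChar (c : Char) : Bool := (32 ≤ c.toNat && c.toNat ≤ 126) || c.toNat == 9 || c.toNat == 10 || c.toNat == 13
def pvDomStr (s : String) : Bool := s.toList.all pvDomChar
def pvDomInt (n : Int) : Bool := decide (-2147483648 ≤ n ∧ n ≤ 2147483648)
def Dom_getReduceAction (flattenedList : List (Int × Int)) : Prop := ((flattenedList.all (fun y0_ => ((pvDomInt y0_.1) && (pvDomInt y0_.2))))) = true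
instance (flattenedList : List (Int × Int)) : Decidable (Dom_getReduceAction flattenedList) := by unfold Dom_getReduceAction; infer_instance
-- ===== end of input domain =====

-- B: one bounds-checked pass (explode returned immediately, first split index accumulated)
-- instead of A's two scans; same return value wherever A returns (A's IndexError inputs excluded by Pre_).

-- ===== PORT A =====
-- A's first loop: first i with fl[i][1] > 4 and fl[i+1][1] == fl[i][1]; the fl[i+1] access
-- uses getD (0,0): exact wherever Python does not raise (inside Pre_ the loop never reads i+1 = len).
def pvCondExplodeA (fl : List (Int × Int)) (i : Nat) : Bool :=
  decide ((fl.getD i (0,0)).2 > 4 ∧ (fl.getD (i+1) (0,0)).2 = (fl.getD i (0,0)).2)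

def pvCondSplit (fl : List (Int × Int)) (i : Nat) : Bool :=
  decide ((fl.getD i (0,0)).1 > 9)

def getReduceAction (flattenedList : List (Int × Int)) : Option String × Option Int :=
  match (List.range flattenedList.length).find? (pvCondExplodeA flattenedList) with
  | some i => (some "explode", some (i : Int))
  | none =>
    match (List.range flattenedList.length).find? (pvCondSplit flattenedList) with
    | some i => (some "split", some (i : Int))
    | none => (none, none)

-- ===== PORT B =====
-- B's explode test carries the explicit i+1 < n bound of Source B.
def pvCondExplodeB (fl : List (Int × Int)) (i : Nat) : Bool :=
  decide (i + 1 < fl.length ∧ (fl.getD i (0,0)).2 > 4 ∧ (fl.getD (i+1) (0,0)).2 = (fl.getD i (0,0)).2)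

-- Source B's single loop over i in range(n): rem counts the remaining iterations (n - i),
-- firstSplit is the first_split accumulator.
def pvAltLoop (fl : List (Int × Int)) (rem i : Nat) (firstSplit : Option Nat) : Option String × Option Int :=
  match rem with
  | 0 =>
    match firstSplit with
    | some j => (some "split", some (j : Int))
    | none => (none, none)
  | r + 1 =>
    if pvCondExplodeB fl i then (some "explode", some (i : Int))
    else pvAltLoop fl r (i+1)
      (if firstSplit = none ∧ pvCondSplit fl i then some i else firstSplit)

def getReduceAction_alt (flattenedList : List (Int × Int)) : Option String × Option Int :=
  pvAltLoop flattenedList flattenedList.length 0 none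

-- ===== PRECONDITION & SPEC =====
-- Pre_ excludes exactly the inputs where Python A raises IndexError: a non-empty list whose
-- last element has depth > 4 while no adjacent explode pair occurs earlier.
def Pre_getReduceAction (flattenedList : List (Int × Int)) : Prop :=
  flattenedList = [] ∨
  ((flattenedList.getLast?.map Prod.snd).getD 0 ≤ 4) ∨
  (∃ i < flattenedList.length - 1,
    (flattenedList.getD i (0,0)).2 > 4 ∧
    (flattenedList.getD (i+1) (0,0)).2 = (flattenedList.getD i (0,0)).2)
instance (flattenedList : List (Int × Int)) : Decidable (Pre_getReduceAction flattenedList) := by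
  unfold Pre_getReduceAction; infer_instance

def pvWitness_getReduceAction : (List (Int × Int)) := [(10, 1), (2, 5), (3, 5)]

-- On non-empty lists whose last element has depth > 4 and which contain no adjacent explode
-- pair, A raises IndexError at flattenedList[i+1]; B returns the normal answer.
def Raises_getReduceAction (flattenedList : List (Int × Int)) : Prop :=
  flattenedList ≠ [] ∧
  ((flattenedList.getLast?.map Prod.snd).getD 0 > 4) ∧
  ¬ (∃ i < flattenedList.length - 1,
    (flattenedList.getD i (0,0)).2 > 4 ∧
    (flattenedList.getD (i+1) (0,0)).2 = (flattenedList.getD i (0,0)).2)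
instance (flattenedList : List (Int × Int)) : Decidable (Raises_getReduceAction flattenedList) := by
  unfold Raises_getReduceAction; infer_instance

def pvRaiseWitness_getReduceAction : (List (Int × Int)) := [(0, 5)]
def pvRaiseWitnessOut_getReduceAction : Option String × Option Int := (none, none)

def Spec_getReduceAction (flattenedList : List (Int × Int)) (out : Option String × Option Int) : Prop := out = getReduceAction_alt flattenedList
instance (flattenedList : List (Int × Int)) (out : Option String × Option Int) : Decidable (Spec_getReduceAction flattenedList out) := by unfold Spec_getReduceAction; infer_instance

-- ===== CLAIM (what is proved, stated in full; the proofs are below) =====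
def Claim_equal_getReduceAction : Prop := ∀ (flattenedList : List (Int × Int)), Dom_getReduceAction flattenedList → Pre_getReduceAction flattenedList → Spec_getReduceAction flattenedList (getReduceAction flattenedList)

def Claim_raises_getReduceAction : Prop := (∀ (flattenedList : List (Int × Int)), Dom_getReduceAction flattenedList → Raises_getReduceAction flattenedList → ¬ Pre_getReduceAction flattenedList) ∧ (Dom_getReduceAction (pvRaiseWitness_getReduceAction) ∧ Raises_getReduceAction (pvRaiseWitness_getReduceAction) ∧ getReduceAction_alt (pvRaiseWitness_getReduceAction) = pvRaiseWitnessOut_getReduceAction)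

-- ===== LEMMAS AND PROOFS =====

-- A's explode condition and B's are the same boolean at EVERY index: at i = length-1 (or beyond),
-- fl.getD (i+1) (0,0) = (0,0) and the depth being > 4 rules out equality with 0.
lemma condExplode_eq (fl : List (Int × Int)) (i : Nat) :
    pvCondExplodeA fl i = pvCondExplodeB fl i := by
  unfold pvCondExplodeA pvCondExplodeB
  by_cases h1 : i + 1 < fl.length
  · simp [h1]
  · have hget : fl.getD (i+1) (0,0) = (0,0) := by
      rw [List.getD_eq_getElem?_getD, List.getElem?_eq_none (by omega)]; rfl
    rw [hget]
    simp [h1]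
    intro hgt heq
    omega

-- Characterisation of Source B's loop in terms of find? over the remaining indices.
lemma pvAltLoop_eq (fl : List (Int × Int)) (rem i : Nat) (fs : Option Nat)
    (hrem : i + rem = fl.length) :
    pvAltLoop fl rem i fs =
      match (List.range' i rem).find? (pvCondExplodeB fl) with
      | some j => (some "explode", some (j : Int))
      | none =>
        match fs with
        | some j => (some "split", some (j : Int))
        | none =>
          match (List.range' i rem).find? (pvCondSplit fl) with
          | some j => (some "split", some (j : Int))
          | none => (none, none) := by
  induction rem generalizing i fs with
  | zero => simp [pvAltLoop]
  | succ r ih =>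
    rw [pvAltLoop, List.range'_succ]
    simp only [List.find?_cons]
    by_cases he : pvCondExplodeB fl i
    · simp [he]
    · simp only [he, Bool.false_eq_true, if_false]
      rw [ih (i+1) _ (by omega)]
      cases hfind : (List.range' (i+1) r).find? (pvCondExplodeB fl) with
      | some j => simp
      | none =>
        simp only
        cases fs with
        | some j => simp
        | none =>
          by_cases hs : pvCondSplit fl i
          · simp [hs]
          · simp [hs]

-- ===== VERDICT (by name: the statement is the Claim_ definition above) =====
theorem getReduceAction_spec : Claim_equal_getReduceAction := by
  intro fl _ _
  unfold Spec_getReduceAction getReduceAction getReduceAction_alt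
  rw [pvAltLoop_eq fl fl.length 0 none (by omega)]
  have hfun : pvCondExplodeA fl = pvCondExplodeB fl := funext (condExplode_eq fl)
  rw [List.range_eq_range', hfun]

@[simp] theorem getReduceAction_raises : Claim_raises_getReduceAction := by
  unfold Claim_raises_getReduceAction
  exact ⟨by
    intro fl _ hr hp
    unfold Raises_getReduceAction at hr
    unfold Pre_getReduceAction at hp
    rcases hr with ⟨h1, h2, h3⟩
    rcases hp with h | h | h
    · exact h1 h
    · omega
    · exact h3 h, by decide⟩
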